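-- pv_equiv track=rewrite | github.com/jcng75/IceCreamTerminalStore | utility.py | isMoney
-- ===== SOURCE A (Python) =====
-- def isMoney(s):
--     # Base case
--     if s == '':
--         return False
--     # Keep 2 counters
--     decimalCounter = 0
--     afterDecimalCounter = 0
--     # Logic: If there are more than 2 decimals, return false
--     # If there are more than two values after the decimal, return false
--     # Otherwise, return true
--     for char in s:
--         if char.isnumeric():
--             if decimalCounter > 0 and afterDecimalCounter == 2:
--                 return False
--             elif decimalCounter > 0:
--                 afterDecimalCounter += 1
--         elif char == '.' and decimalCounter == 0:
--             decimalCounter += 1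
--         else:
--             return False
--     return True
-- ===== SOURCE B (Python) =====
-- def isMoney(s):
--     if s == '':
--         return False
--     parts = s.split('.')
--     if len(parts) > 2:
--         return False
--     if len(parts) == 2 and len(parts[1]) > 2:
--         return False
--     return all(c.isnumeric() for part in parts for c in part)
-- ===== Notes on version B (the rewrite author's own statement) =====
-- stated objective: simpler
-- what changed: B replaces A's two-counter single-pass character scan with a split-on-'.' decomposition: length checks on the split parts (too many dots, too many decimals) followed by a digit check over the parts.
import Mathlib
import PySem

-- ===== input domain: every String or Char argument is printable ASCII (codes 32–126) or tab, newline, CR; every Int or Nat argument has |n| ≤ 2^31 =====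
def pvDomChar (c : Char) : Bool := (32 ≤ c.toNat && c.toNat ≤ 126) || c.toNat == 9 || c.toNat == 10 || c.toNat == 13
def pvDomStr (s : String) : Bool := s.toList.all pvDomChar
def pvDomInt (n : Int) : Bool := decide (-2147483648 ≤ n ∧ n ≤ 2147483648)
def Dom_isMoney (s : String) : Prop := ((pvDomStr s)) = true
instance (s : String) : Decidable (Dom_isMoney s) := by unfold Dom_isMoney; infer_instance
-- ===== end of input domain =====

-- B splits on '.' and validates the (≤ 2) parts instead of A's two-counter character scan; objective: simpler decomposition.

-- ===== PORT A =====
-- char.isnumeric() is ported as PySem.Chars.isdigit, exact on the ASCII domain Dom_isMoney.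
def isMoneyLoop : List Char → Nat → Nat → Bool
  | [], _, _ => true
  | c :: rest, dc, adc =>
    if PySem.Chars.isdigit c then
      if dc > 0 && adc == 2 then false
      else if dc > 0 then isMoneyLoop rest dc (adc + 1)
      else isMoneyLoop rest dc adc
    else if c == '.' && dc == 0 then isMoneyLoop rest (dc + 1) adc
    else false

def isMoney (s : String) : Bool :=
  if s = "" then false else isMoneyLoop s.toList 0 0

-- ===== PORT B =====
def isMoney_alt (s : String) : Bool :=
  if s = "" then false
  else
    let parts := PySem.Chars.splitOn s.toList ['.']
    if parts.length > 2 then false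
    else if parts.length == 2 && (parts.getD 1 []).length > 2 then false
    else parts.all (fun p => p.all PySem.Chars.isdigit)

-- ===== PRECONDITION & SPEC =====
def Spec_isMoney (s : String) (out : Bool) : Prop := out = isMoney_alt s
instance (s : String) (out : Bool) : Decidable (Spec_isMoney s out) := by unfold Spec_isMoney; infer_instance

-- ===== CLAIM (what is proved, stated in full; the proofs are below) =====
def Claim_equal_isMoney : Prop := ∀ (s : String), Dom_isMoney s → Spec_isMoney s (isMoney s)

-- ===== LEMMAS AND PROOFS =====

-- structural single-char split (proof helper)
def splitDot : List Char → List (List Char)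
  | [] => [[]]
  | c :: rest => if c = '.' then [] :: splitDot rest else (splitDot rest).modifyHead (c :: ·)

theorem splitDot_ne_nil : ∀ (l : List Char), splitDot l ≠ []
  | [] => by simp [splitDot]
  | c :: rest => by
    have := splitDot_ne_nil rest
    simp only [splitDot]
    split
    · simp
    · cases h : splitDot rest <;> simp_all [List.modifyHead]

theorem go_eq_splitDot (fuel : Nat) : ∀ (l cur : List Char) (acc : List (List Char)),
    l.length < fuel →
    PySem.Chars.splitOn.go ['.'] fuel l cur acc
      = acc.reverse ++ (splitDot l).modifyHead (cur.reverse ++ ·) := by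
  induction fuel with
  | zero => intro l cur acc h; omega
  | succ n ih =>
    intro l cur acc h
    cases l with
    | nil => simp [PySem.Chars.splitOn.go, splitDot, List.modifyHead]
    | cons c rest =>
      simp only [PySem.Chars.splitOn.go, List.isPrefixOf, Bool.and_true]
      by_cases hc : c = '.'
      · subst hc
        simp only [beq_self_eq_true, if_pos, List.length_cons, List.length_nil,
          List.drop_succ_cons, List.drop_zero]
        rw [ih rest [] (cur.reverse :: acc) (by simpa using Nat.lt_of_succ_lt_succ h)]
        cases hs : splitDot rest with
        | nil => exact absurd hs (splitDot_ne_nil rest)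
        | cons p ps => simp [splitDot, hs, List.modifyHead]
      · have hne : ('.' == c) = false := by simp [BEq.beq]; exact fun e => hc e.symm
        rw [if_neg (by simp [hne])]
        rw [ih rest (c :: cur) acc (by simpa using Nat.lt_of_succ_lt_succ h)]
        cases hs : splitDot rest with
        | nil => exact absurd hs (splitDot_ne_nil rest)
        | cons p ps => simp [splitDot, hc, hs, List.modifyHead]

theorem splitOn_eq_splitDot (l : List Char) :
    PySem.Chars.splitOn l ['.'] = splitDot l := by
  have h := go_eq_splitDot (l.length + 1) l [] [] (by omega)
  rw [PySem.Chars.splitOn, h]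
  cases hs : splitDot l with
  | nil => exact absurd hs (splitDot_ne_nil l)
  | cons p ps => simp [List.modifyHead]

theorem loop_one (l : List Char) (adc : Nat) (h : adc ≤ 2) :
    isMoneyLoop l 1 adc = (l.all PySem.Chars.isdigit && decide (adc + l.length ≤ 2)) := by
  induction l generalizing adc with
  | nil => simp [isMoneyLoop]; omega
  | cons c rest ih =>
    simp only [isMoneyLoop]
    by_cases hd : PySem.Chars.isdigit c
    · simp only [hd, if_pos]
      by_cases ha : adc = 2
      · subst ha; simp
      · have h2 : adc + 1 ≤ 2 := by omega
        simp only [ha, Nat.zero_lt_one, decide_true, beq_iff_eq,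
          Bool.true_and, if_pos, ih (adc + 1) h2]
        simp only [hd, List.all_cons, Bool.true_and, List.length_cons]
        have e : adc + 1 + rest.length = adc + (rest.length + 1) := by omega
        rw [e, if_neg (fun hf => hf)]
        rfl
    · simp [hd, List.all_cons]

def bCore (l : List Char) : Bool :=
  let parts := splitDot l
  if parts.length > 2 then false
  else if parts.length == 2 && (parts.getD 1 []).length > 2 then false
  else parts.all (fun p => p.all PySem.Chars.isdigit)

theorem hd_dot : PySem.Chars.isdigit '.' = false := by decide

theorem loop_zero (l : List Char) : isMoneyLoop l 0 0 = bCore l := by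
  induction l with
  | nil => simp [isMoneyLoop, bCore, splitDot]
  | cons c rest ih =>
    simp only [isMoneyLoop]
    by_cases hc : c = '.'
    · subst hc
      rw [if_neg (by simp [hd_dot]), if_pos (by simp)]
      rw [loop_one rest 0 (by omega)]
      simp only [bCore, splitDot]
      by_cases hm : ('.' : Char) ∈ rest
      · have hlen : 2 ≤ (splitDot rest).length := by
          clear ih
          induction rest with
          | nil => simp at hm
          | cons d tl ihr =>
            by_cases hd2 : d = '.'
            · subst hd2
              have h1 : 1 ≤ (splitDot tl).length := by
                have := splitDot_ne_nil tl
                cases hsp : splitDot tl <;> simp_all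
              simp [splitDot]
              omega
            · have hmem : ('.' : Char) ∈ tl := by
                rcases List.mem_cons.mp hm with h | h
                · exact absurd h.symm hd2
                · exact h
              simp only [splitDot, if_neg hd2]
              have : ((splitDot tl).modifyHead (d :: ·)).length = (splitDot tl).length := by
                cases splitDot tl <;> simp [List.modifyHead]
              rw [this]
              exact ihr hmem
        have hall : rest.all PySem.Chars.isdigit = false := by
          simp only [List.all_eq_false]
          exact ⟨'.', hm, by simp [hd_dot]⟩
        simp [hall]
        omega
      · have hs : splitDot rest = [rest] := by
          clear ih
          induction rest with
          | nil => simp [splitDot]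
          | cons d tl ihr =>
            have hd2 : d ≠ '.' := fun e => hm (by simp [e])
            have : ('.' : Char) ∉ tl := fun e => hm (by simp [e])
            simp [splitDot, hd2, ihr this, List.modifyHead]
        rw [hs]
        rw [if_neg (by simp)]
        by_cases h2 : rest.length ≤ 2
        · rw [if_neg (by simp; omega)]
          simp [show (0 + rest.length ≤ 2) from by omega]
          exact fun _ => h2
        · rw [if_pos (by simp; omega)]
          simp [show ¬(0 + rest.length ≤ 2) from by omega]
          exact fun _ => by omega
    · simp only [bCore, splitDot, if_neg hc]
      cases hs : splitDot rest with
      | nil => exact absurd hs (splitDot_ne_nil rest)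
      | cons p ps =>
        by_cases hd : PySem.Chars.isdigit c
        · have hcb : (c == '.') = false := by simp [hc]
          simp only [hd, if_pos, Nat.lt_irrefl, decide_false, Bool.false_and,
            if_neg, ih, bCore, hs, List.modifyHead]
          simp [hd]
        · have hcb : (c == '.') = false := by simp [hc]
          rw [if_neg (by simp [hd]), if_neg (by simp [hcb])]
          simp only [bCore, List.modifyHead, hs]
          split_ifs <;> simp [hd]

-- ===== VERDICT (by name: the statement is the Claim_ definition above) =====
theorem isMoney_spec : Claim_equal_isMoney := by
  intro s _
  unfold Spec_isMoney isMoney isMoney_alt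
  by_cases h : s = ""
  · simp [h]
  · simp only [h, splitOn_eq_splitDot, loop_zero, bCore]
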